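-- pv_equiv track=rewrite | github.com/Jasonlee1995/Python_Cookbook | unicodedata_example.py | gather_text_info
-- ===== SOURCE A (Python) =====
-- import unicodedata
--
-- def gather_text_info(text):
--     info = {}
--     for c in text:
--         category = unicodedata.category(c)
--         if category not in info:
--             info[category] = []
--         info[category].append(c)
--     return info
-- ===== SOURCE B (Python) =====
-- import unicodedata
--
-- def gather_text_info(text):
--     # recursive partition: take the first remaining category, collect all its
--     # characters, recurse on the rest (depth = number of distinct categories)
--     def go(ps):
--         if not ps:
--             return []
--         k = ps[0][1]
--         same = [c for c, k2 in ps if k2 == k]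
--         rest = [(c, k2) for c, k2 in ps if k2 != k]
--         return [(k, same)] + go(rest)
--     return dict(go([(c, unicodedata.category(c)) for c in text]))
-- ===== Notes on version B (the rewrite author's own statement) =====
-- stated objective: alternative
-- what changed: replaces A's incremental check-membership-then-append dict loop with a recursive partition: pair each char with its category once, then repeatedly split off all characters of the first remaining category and recurse on the rest
import Mathlib
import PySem

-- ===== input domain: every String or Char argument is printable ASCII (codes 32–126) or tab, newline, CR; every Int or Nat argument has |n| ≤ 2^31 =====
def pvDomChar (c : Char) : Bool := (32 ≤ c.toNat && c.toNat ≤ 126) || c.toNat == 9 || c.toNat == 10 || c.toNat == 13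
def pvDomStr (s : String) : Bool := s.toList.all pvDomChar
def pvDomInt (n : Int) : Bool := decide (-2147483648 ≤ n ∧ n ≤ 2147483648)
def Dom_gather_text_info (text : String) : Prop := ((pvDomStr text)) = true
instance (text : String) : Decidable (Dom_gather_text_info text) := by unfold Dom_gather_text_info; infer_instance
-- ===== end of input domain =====

-- B groups by recursive partition on the first remaining category instead of A's incremental
-- membership-check-then-append dict loop; same cost class, alternative decomposition.

-- shared library primitive: unicodedata.category, exact on the Dom alphabet (ASCII 32–126, tab, LF, CR)
def pyCat (c : Char) : String :=
  let n := c.toNat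
  if 97 ≤ n ∧ n ≤ 122 then "Ll"
  else if 65 ≤ n ∧ n ≤ 90 then "Lu"
  else if 48 ≤ n ∧ n ≤ 57 then "Nd"
  else if n = 32 then "Zs"
  else if n = 9 ∨ n = 10 ∨ n = 13 then "Cc"
  else if n = 36 then "Sc"
  else if n = 43 ∨ n = 60 ∨ n = 61 ∨ n = 62 ∨ n = 124 ∨ n = 126 then "Sm"
  else if n = 40 ∨ n = 91 ∨ n = 123 then "Ps"
  else if n = 41 ∨ n = 93 ∨ n = 125 then "Pe"
  else if n = 45 then "Pd"
  else if n = 95 then "Pc"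
  else if n = 94 ∨ n = 96 then "Sk"
  else "Po"

-- ===== PORT A =====
def gather_text_info (text : String) : List (String × List String) :=
  (text.toList.foldl (fun info c =>
      let category := pyCat c
      let info' := if info.contains category then info else info.insert category []
      info'.modify category [] (fun l => l ++ [String.ofList [c]]))
    (PySem.Dict.empty : PySem.Dict String (List String))).items

-- ===== PORT B =====
-- B's inner 'go': split off the first category, recurse on the remaining pairs
def goB : List (Char × String) → List (String × List String)
  | [] => []
  | p :: t =>
      (p.2, ((p :: t).filter (fun q => q.2 == p.2)).map (fun q => String.ofList [q.1]))
        :: goB ((p :: t).filter (fun q => !(q.2 == p.2)))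
termination_by ps => ps.length
decreasing_by
  simp only [List.filter, beq_self_eq_true, Bool.not_true]
  exact Nat.lt_succ_of_le (List.length_filter_le _ _)

def gather_text_info_alt (text : String) : List (String × List String) :=
  (PySem.Dict.ofList (goB (text.toList.map (fun c => (c, pyCat c))))).items

-- ===== PRECONDITION & SPEC =====
def Spec_gather_text_info (text : String) (out : List (String × List String)) : Prop := out = gather_text_info_alt text
instance (text : String) (out : List (String × List String)) : Decidable (Spec_gather_text_info text out) := by unfold Spec_gather_text_info; infer_instance

-- ===== CLAIM (what is proved, stated in full; the proofs are below) =====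
def Claim_equal_gather_text_info : Prop := ∀ (text : String), Dom_gather_text_info text → Spec_gather_text_info text (gather_text_info text)

-- ===== LEMMAS AND PROOFS =====

theorem zip_map_self (cs : List Char) (f : Char → String) :
    cs.zip (cs.map f) = cs.map (fun c => (c, f c)) := by
  induction cs with
  | nil => rfl
  | cons c t ih => simp [ih]

-- A's per-character step (ensure-key-then-append) is the modify-with-default step
theorem step_eq (d : PySem.Dict String (List String)) (k : String) (v : String) :
    (if d.contains k then d else d.insert k []).modify k [] (fun l => l ++ [v])
      = d.modify k [] (fun l => l ++ [v]) := by
  by_cases h : d.contains k = true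
  · simp [h]
  · have h' : d.contains k = false := by simpa using h
    simp [h, PySem.Dict.modify, PySem.Dict.getD_insert_self,
      PySem.Dict.insert_insert_self, PySem.Dict.getD_of_not_contains d [] h']

-- A's dict loop, characterised: first-appearance categories, each with its filtered chars
theorem a_char (cs : List Char) :
    (cs.foldl (fun info c =>
        (if info.contains (pyCat c) then info else info.insert (pyCat c) []).modify
          (pyCat c) [] (fun l => l ++ [String.ofList [c]]))
      (PySem.Dict.empty : PySem.Dict String (List String))).items
    = (PySem.List.dedup (cs.map pyCat)).map (fun k =>
        (k, ((cs.zip (cs.map pyCat)).filter (fun p => p.2 == k)).map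
          (fun p => String.ofList [p.1]))) := by
  rw [PySem.List.foldl_congr_mem cs _
        (fun d c => d.modify (pyCat c) [] (fun l => l ++ [String.ofList [c]]))
        PySem.Dict.empty
        (fun d c _ => step_eq d (pyCat c) (String.ofList [c]))]
  have hfold : cs.foldl
      (fun d c => d.modify (pyCat c) [] (fun l => l ++ [String.ofList [c]]))
      (PySem.Dict.empty : PySem.Dict String (List String))
      = (cs.map (fun c => (pyCat c, String.ofList [c]))).foldl
          (fun d p => d.modify p.1 [] (fun l => l ++ [p.2])) PySem.Dict.empty := by
    rw [List.foldl_map]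
  rw [hfold]
  have hnd := PySem.Dict.nodup_keys_foldl_modify_key
      (cs.map (fun c => (pyCat c, String.ofList [c]))) Prod.fst []
      (fun d p l => l ++ [p.2]) PySem.Dict.empty (by simp)
  rw [PySem.Dict.items_eq_map_keys _ hnd []]
  have hkeys : ((cs.map (fun c => (pyCat c, String.ofList [c]))).foldl
      (fun d p => d.modify p.1 [] (fun l => l ++ [p.2])) PySem.Dict.empty).keys
      = PySem.List.dedup (cs.map pyCat) := by
    rw [PySem.Dict.keys_foldl_modify_key]
    simp [PySem.Dict.keys_empty, List.map_map, PySem.List.dedup_eq_ofList,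
      PySem.Set.update, PySem.Set.ofList_eq_foldl, Function.comp_def]
  rw [hkeys]
  apply List.map_congr_left
  intro k _
  rw [PySem.Dict.getD_foldl_modify_append]
  simp only [PySem.Dict.getD_empty, List.nil_append]
  rw [zip_map_self cs pyCat]
  simp [List.filter_map, List.map_map, Function.comp_def]

-- filtering commutes with first-occurrence dedup
theorem filter_ofList {α : Type} [BEq α] [LawfulBEq α] (p : α → Bool) (xs : List α) :
    (PySem.Set.ofList xs).filter p = PySem.Set.ofList (xs.filter p) := by
  induction xs with
  | nil => rfl
  | cons x t ih =>
    rw [PySem.Set.ofList_cons, PySem.Set.discard]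
    by_cases hx : p x = true
    · rw [List.filter_cons_of_pos hx, List.filter_cons_of_pos hx,
        List.filter_comm, ih, PySem.Set.ofList_cons, PySem.Set.discard]
    · have hx' : p x = false := by simpa using hx
      rw [List.filter_cons_of_neg (by simp [hx']), List.filter_cons_of_neg (by simp [hx']),
        List.filter_comm, ih]
      apply List.filter_eq_self.mpr
      intro y hy
      have hpy : p y = true := (List.mem_filter.mp (((PySem.Set.mem_ofList _ _).mp hy))).2
      have : y ≠ x := fun h => by rw [h] at hpy; simp [hx'] at hpy
      simpa using this

-- B's recursive partition, characterised by the same formula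
theorem goB_char (ps : List (Char × String)) :
    goB ps = (PySem.List.dedup (ps.map Prod.snd)).map (fun k =>
      (k, (ps.filter (fun q => q.2 == k)).map (fun q => String.ofList [q.1]))) := by
  induction hn : ps.length using Nat.strong_induction_on generalizing ps with
  | _ n ih =>
  match ps with
  | [] => simp [goB]
  | p :: t =>
    have hrest : ((p :: t).filter (fun q => !(q.2 == p.2))).length < n := by
      rw [← hn, List.filter_cons_of_neg (by simp), List.length_cons]
      exact Nat.lt_succ_of_le (List.length_filter_le _ _)
    rw [goB, ih _ hrest _ rfl]
    have hmap : ((p :: t).filter (fun q => !(q.2 == p.2))).map Prod.snd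
        = ((p :: t).map Prod.snd).filter (fun x => !(x == p.2)) := by
      rw [List.filter_map]; rfl
    rw [hmap]
    have hded : PySem.List.dedup ((p :: t).map Prod.snd)
        = p.2 :: PySem.List.dedup (((p :: t).map Prod.snd).filter (fun x => !(x == p.2))) := by
      simp only [PySem.List.dedup_eq_ofList, List.map_cons, PySem.Set.ofList_cons,
        PySem.Set.discard, filter_ofList]
      congr 2
      simp
    rw [hded, List.map_cons]
    congr 1
    apply List.map_congr_left
    intro k hk
    have hkne : k ≠ p.2 := by
      have h1 := (PySem.List.mem_dedup _ _).mp hk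
      have := (List.mem_filter.mp h1).2
      simpa using this
    congr 1
    rw [List.filter_filter]
    congr 1
    apply List.filter_congr
    intro q _
    by_cases h : q.2 = k
    · simp [h, hkne]
    · simp [h]

-- dict(pairs) lists pairs in order when the keys are pairwise distinct
theorem items_ofList_of_nodup (l : List (String × List String))
    (h : (l.map Prod.fst).Nodup) : (PySem.Dict.ofList l).items = l := by
  have h1 := PySem.Dict.items_foldl_insert_fresh l Prod.fst Prod.snd
      (PySem.Dict.empty : PySem.Dict String (List String)) (by intro a _; simp) h
  simpa [PySem.Dict.ofList, PySem.Dict.update] using h1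

-- goB's keys are exactly the deduped categories, hence nodup
theorem goB_keys_nodup (ps : List (Char × String)) :
    ((goB ps).map Prod.fst).Nodup := by
  rw [goB_char]
  simp only [List.map_map, Function.comp_def]
  rw [show ((fun k => ((k, (ps.filter (fun q => q.2 == k)).map (fun q => String.ofList [q.1])) : String × List String).1)) = fun (k : String) => k from rfl]
  rw [List.map_id', PySem.List.dedup_eq_ofList]
  exact PySem.Set.nodup_ofList (ps.map Prod.snd)

theorem main_eq (cs : List Char) : gather_text_info (String.ofList cs) = gather_text_info_alt (String.ofList cs) := by
  unfold gather_text_info gather_text_info_alt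
  rw [items_ofList_of_nodup _ (goB_keys_nodup _), goB_char]
  simp only [String.toList_ofList]
  rw [a_char, zip_map_self]
  simp [List.map_map, Function.comp_def]

-- ===== VERDICT (by name: the statement is the Claim_ definition above) =====
theorem gather_text_info_spec : Claim_equal_gather_text_info := by
  intro text _
  have := main_eq text.toList
  simpa [String.ofList_toList] using this
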